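-- pv_equiv track=rewrite | github.com/naqdotcom/Tugas_keamanan | enigmagui.py | enigma_cipher
-- ===== SOURCE A (Python) =====
-- rotors = [
--     "EKMFLGDQVZNTOWYHXUSPAIBRCJ",  # Rotor I
--     "AJDKSIRUXBLHWTMCQGZNPYFVOE",  # Rotor II
--     "BDFHJLCPRTXVZNYEIWGAKMUSQO"   # Rotor III
-- ]
--
-- reflector = "YRUHQSLDPXNGOKMIEBFZCWVJAT"
--
-- def enigma_cipher(text, rotor_positions):
--     rotor1, rotor2, rotor3 = [list(rotors[i]) for i in rotor_positions]
--     result = ""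
--
--     for char in text.upper():
--         if not char.isalpha():  # Abaikan karakter non-alfabet
--             result += char
--             continue
--
--         # Forward pass
--         idx = ord(char) - ord('A')
--         idx = ord(rotor1[idx]) - ord('A')
--         idx = ord(rotor2[idx]) - ord('A')
--         idx = ord(rotor3[idx]) - ord('A')
--
--         # Reflection
--         reflected = reflector[idx]
--         idx = ord(reflected) - ord('A')
--
--         # Backward pass
--         idx = rotor3.index(chr(idx + ord('A')))
--         idx = rotor2.index(chr(idx + ord('A')))
--         idx = rotor1.index(chr(idx + ord('A')))
--
--         result += chr(idx + ord('A'))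
--
--         # Rotor Rotation
--         rotor1 = rotor1[1:] + rotor1[:1]
--
--     return result
-- ===== SOURCE B (Python) =====
-- rotors = [
--     "EKMFLGDQVZNTOWYHXUSPAIBRCJ",  # Rotor I
--     "AJDKSIRUXBLHWTMCQGZNPYFVOE",  # Rotor II
--     "BDFHJLCPRTXVZNYEIWGAKMUSQO"   # Rotor III
-- ]
--
-- reflector = "YRUHQSLDPXNGOKMIEBFZCWVJAT"
--
-- def enigma_cipher(text, rotor_positions):
--     # Algebraic formulation: the whole scrambler at rotation k is the conjugate
--     # rho^-k . P^-1 . R . P . rho^k of ONE fixed composed map M = P^-1 . R . P,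
--     # where P = rotor3 . rotor2 . rotor1.  So: compose everything into a single
--     # 26-entry map M once, then do two staged passes over the text: first a
--     # prefix-count pass giving each character its rotation offset, then a flat
--     # zip/map pass encoding with modular offset arithmetic around M.
--     A = ord('A')
--     f1, f2, f3 = ([ord(c) - A for c in rotors[p]] for p in rotor_positions)
--     refl = [ord(c) - A for c in reflector]
--
--     def compose(f, g):  # g after f, as a 26-entry array
--         return [g[f[i]] for i in range(26)]
--
--     P = compose(compose(f1, f2), f3)
--     Pinv = [0] * 26
--     for i, v in enumerate(P):
--         Pinv[v] = i
--     M = [Pinv[refl[v]] for v in P]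
--
--     up = text.upper()
--     offs = []
--     k = 0
--     for ch in up:
--         offs.append(k)
--         if ch.isalpha():
--             k += 1
--     return ''.join(
--         chr((M[(ord(ch) - A + k) % 26] - k) % 26 + A) if ch.isalpha() else ch
--         for ch, k in zip(up, offs))
-- ===== Notes on version B (the rewrite author's own statement) =====
-- stated objective: faster
-- what changed: Replaces A's per-character work (rotation by list slicing and three linear .index scans per letter) by composing the rotors and reflector once into a single 26-entry map M (the machine at rotation k is the shift-k conjugate of M), then two staged passes: a prefix pass assigning each character its rotation offset and a flat zip/map pass encoding via modular arithmetic around M.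
import Mathlib
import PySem

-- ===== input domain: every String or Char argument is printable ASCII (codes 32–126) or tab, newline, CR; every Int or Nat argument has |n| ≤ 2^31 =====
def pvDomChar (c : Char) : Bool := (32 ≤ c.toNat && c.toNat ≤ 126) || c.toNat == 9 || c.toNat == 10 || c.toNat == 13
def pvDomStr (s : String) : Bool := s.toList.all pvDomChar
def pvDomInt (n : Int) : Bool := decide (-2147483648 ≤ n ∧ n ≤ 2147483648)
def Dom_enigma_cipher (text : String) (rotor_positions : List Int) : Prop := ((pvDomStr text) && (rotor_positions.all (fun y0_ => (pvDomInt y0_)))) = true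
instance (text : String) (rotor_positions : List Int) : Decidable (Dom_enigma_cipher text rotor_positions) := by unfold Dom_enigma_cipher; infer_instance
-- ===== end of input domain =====

-- B replaces A's per-character permutation chase (rotation by list slicing, three
-- linear `.index` scans per letter) by one up-front composition of all rotors and the
-- reflector into a single 26-entry map M (the machine at rotation k is the conjugate
-- of M by the shift k), then two staged passes: a prefix-count pass assigning each
-- character its offset and a flat zip/map pass using modular arithmetic around M.
-- Result-value equivalence; neither program mutates its arguments.

-- ===== PORT A =====
-- Module constants as A's `list(...)` sees them.
def pvRotorsA : List (List Char) :=
  [['E', 'K', 'M', 'F', 'L', 'G', 'D', 'Q', 'V', 'Z', 'N', 'T', 'O', 'W', 'Y', 'H', 'X', 'U', 'S', 'P', 'A', 'I', 'B', 'R', 'C', 'J'],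
   ['A', 'J', 'D', 'K', 'S', 'I', 'R', 'U', 'X', 'B', 'L', 'H', 'W', 'T', 'M', 'C', 'Q', 'G', 'Z', 'N', 'P', 'Y', 'F', 'V', 'O', 'E'],
   ['B', 'D', 'F', 'H', 'J', 'L', 'C', 'P', 'R', 'T', 'X', 'V', 'Z', 'N', 'Y', 'E', 'I', 'W', 'G', 'A', 'K', 'M', 'U', 'S', 'Q', 'O']]
def pvReflectorA : List Char :=
  ['Y', 'R', 'U', 'H', 'Q', 'S', 'L', 'D', 'P', 'X', 'N', 'G', 'O', 'K', 'M', 'I', 'E', 'B', 'F', 'Z', 'C', 'W', 'V', 'J', 'A', 'T']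

-- One alphabetic step of A: forward through the three rotors (indexing; `getD` is exact
-- since every index stays in 0..25 on admitted inputs), the reflector, then the three
-- backward `.index` scans (`idxOf`; the element is always present in these permutation
-- lists, where Python's `.index` returns the same position).
def pvStepA (r1 r2 r3 : List Char) (c : Char) : Char :=
  let i0 := c.toNat - 65
  let i1 := (r1.getD i0 'A').toNat - 65
  let i2 := (r2.getD i1 'A').toNat - 65
  let i3 := (r3.getD i2 'A').toNat - 65
  let i4 := (pvReflectorA.getD i3 'A').toNat - 65
  let j3 := r3.idxOf (Char.ofNat (i4 + 65))
  let j2 := r2.idxOf (Char.ofNat (j3 + 65))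
  let j1 := r1.idxOf (Char.ofNat (j2 + 65))
  Char.ofNat (j1 + 65)

-- A's loop over text.upper(): `result` accumulated as a char list (Python builds the
-- same string by `+=`), rotor1 rotated by slicing (`[1:] + [:1]` = drop 1 ++ take 1).
def pvLoopA (r2 r3 : List Char) : List Char → List Char → List Char → List Char
  | [], _, res => res
  | c :: cs, r1, res =>
    if !(PySem.Chars.isalpha c) then pvLoopA r2 r3 cs r1 (res ++ [c])
    else pvLoopA r2 r3 cs (r1.drop 1 ++ r1.take 1) (res ++ [pvStepA r1 r2 r3 c])

-- `rotor1, rotor2, rotor3 = [list(rotors[i]) for i in rotor_positions]` raises unless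
-- rotor_positions has exactly 3 valid indices (Pre_ excludes that); "" is the junk value.
def enigma_cipher (text : String) (rotor_positions : List Int) : String :=
  match rotor_positions with
  | [i1, i2, i3] =>
    match PySem.List.pyGet? pvRotorsA i1, PySem.List.pyGet? pvRotorsA i2, PySem.List.pyGet? pvRotorsA i3 with
    | some r1, some r2, some r3 =>
      String.ofList (pvLoopA r2 r3 (PySem.Chars.upper text.toList) r1 [])
    | _, _, _ => ""
  | _ => ""

-- ===== PORT B =====
-- Source B's module constants, kept as the strings they are.
def pvRotorsB : List String := ["EKMFLGDQVZNTOWYHXUSPAIBRCJ", "AJDKSIRUXBLHWTMCQGZNPYFVOE", "BDFHJLCPRTXVZNYEIWGAKMUSQO"]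
def pvReflectorB : String := "YRUHQSLDPXNGOKMIEBFZCWVJAT"

-- `[ord(c) - A for c in s]`.
def pvFwd (s : List Char) : List Int := s.map (fun c => (c.toNat : Int) - 65)

-- p[i] for an index Source B keeps in 0..25 (so `getD` with `.toNat` is exact here).
def pvIdx (p : List Int) (i : Int) : Int := p.getD i.toNat 0

-- Source B's `compose`: `[g[f[i]] for i in range(26)]`.
def pvCompose (f g : List Int) : List Int := (List.range 26).map (fun i => pvIdx g (pvIdx f (i : Int)))

-- Source B's M: P = r3∘r2∘r1, its inverse array (`Pinv[v] = i` over enumerate(P),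
-- `List.set` exact since every written v is in 0..25), then `[Pinv[refl[v]] for v in P]`.
def pvM (f1 f2 f3 : List Int) : List Int :=
  let refl := pvFwd pvReflectorB.toList
  let P := pvCompose (pvCompose f1 f2) f3
  let Pinv := (PySem.List.enumerate P 0).foldl (fun b iv => b.set iv.2.toNat iv.1) (List.replicate 26 0)
  P.map (fun v => pvIdx Pinv (pvIdx refl v))

-- First staged pass: each character's rotation offset (the count of alpha chars before it).
def pvOffs : List Char → Nat → List Nat
  | [], _ => []
  | c :: cs, k => k :: pvOffs cs (if PySem.Chars.isalpha c then k + 1 else k)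

-- `chr((M[(ord(ch) - A + k) % 26] - k) % 26 + A)`; `%` is Python's (PySem.Int.mod).
def pvEncChar (M : List Int) (c : Char) (k : Nat) : Char :=
  Char.ofNat ((PySem.Int.mod (pvIdx M (PySem.Int.mod ((c.toNat : Int) - 65 + (k : Int)) 26) - (k : Int)) 26).toNat + 65)

-- f1, f2, f3 from the 3-element generator: three indexed fetches; a missing element or
-- bad index is a Python raise (excluded by Pre_): "" is the junk value.
def enigma_cipher_alt (text : String) (rotor_positions : List Int) : String :=
  (((rotor_positions[0]?.bind (PySem.List.pyGet? pvRotorsB)).bind (fun s1 =>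
     (rotor_positions[1]?.bind (PySem.List.pyGet? pvRotorsB)).bind (fun s2 =>
      (rotor_positions[2]?.bind (PySem.List.pyGet? pvRotorsB)).map (fun s3 =>
        let M := pvM (pvFwd s1.toList) (pvFwd s2.toList) (pvFwd s3.toList)
        let up := PySem.Chars.upper text.toList
        String.ofList ((up.zip (pvOffs up 0)).map (fun p =>
          if PySem.Chars.isalpha p.1 then pvEncChar M p.1 p.2 else p.1)))))).getD "")

-- ===== PRECONDITION & SPEC =====
-- A raises (ValueError on unpacking / IndexError) unless rotor_positions is exactly 3
-- Python-valid indices into the 3-element rotor list; Pre_ excludes exactly those inputs.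
def Pre_enigma_cipher (text : String) (rotor_positions : List Int) : Prop :=
  rotor_positions.length = 3 ∧ ∀ i ∈ rotor_positions, -3 ≤ i ∧ i < 3
instance (text : String) (rotor_positions : List Int) : Decidable (Pre_enigma_cipher text rotor_positions) := by unfold Pre_enigma_cipher; infer_instance

def pvWitness_enigma_cipher : String × List Int := ("Attack at Dawn!", [0, 1, 2])

def Spec_enigma_cipher (text : String) (rotor_positions : List Int) (out : String) : Prop := out = enigma_cipher_alt text rotor_positions
instance (text : String) (rotor_positions : List Int) (out : String) : Decidable (Spec_enigma_cipher text rotor_positions out) := by unfold Spec_enigma_cipher; infer_instance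

-- ===== CLAIM (what is proved, stated in full; the proofs are below) =====
def Claim_equal_enigma_cipher : Prop := ∀ (text : String) (rotor_positions : List Int), Dom_enigma_cipher text rotor_positions → Pre_enigma_cipher text rotor_positions → Spec_enigma_cipher text rotor_positions (enigma_cipher text rotor_positions)

-- ===== LEMMAS AND PROOFS =====

-- A valid index selects the same rotor from both transcriptions of the module constant.
lemma pv_get_pair (i : Int) (h1 : -3 ≤ i) (h2 : i < 3) :
    ∃ r s, PySem.List.pyGet? pvRotorsA i = some r ∧ PySem.List.pyGet? pvRotorsB i = some s ∧
      s.toList = r ∧ r ∈ pvRotorsA := by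
  interval_cases i <;> exact ⟨_, _, rfl, rfl, rfl, by decide⟩

-- Finite facts about the three concrete rotors and the reflector (checked by decide).
lemma pv_getD_bounds : ∀ r ∈ pvRotorsA, ∀ m : Fin 26,
    65 ≤ (r.getD (m : Nat) 'A').toNat ∧ (r.getD (m : Nat) 'A').toNat ≤ 90 := by decide

lemma pv_refl_bounds : ∀ m : Fin 26,
    65 ≤ (pvReflectorA.getD (m : Nat) 'A').toNat ∧ (pvReflectorA.getD (m : Nat) 'A').toNat ≤ 90 := by decide

lemma pv_idx_lt : ∀ r ∈ pvRotorsA, ∀ j : Fin 26,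
    r.idxOf (Char.ofNat ((j : Nat) + 65)) < 26 := by decide

-- B's composed map M, looked up at i, is exactly A's forward/reflect/backward chain at i.
set_option maxRecDepth 100000 in
set_option maxHeartbeats 4000000 in
lemma pv_M : ∀ r1 ∈ pvRotorsA, ∀ r2 ∈ pvRotorsA, ∀ r3 ∈ pvRotorsA, ∀ i : Fin 26,
    pvIdx (pvM (pvFwd r1) (pvFwd r2) (pvFwd r3)) ((i : Nat) : Int)
      = ((r1.idxOf (Char.ofNat ((r2.idxOf (Char.ofNat ((r3.idxOf (Char.ofNat (((pvReflectorA.getD ((r3.getD ((r2.getD ((r1.getD ((i : Fin 26) : Nat) 'A').toNat - 65) 'A').toNat - 65) 'A').toNat - 65) 'A').toNat - 65) + 65))) + 65))) + 65)) : Nat) : Int) := by decide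

-- Indexing the k-rotated rotor is modular-offset indexing of the rotor.
set_option maxHeartbeats 1000000 in
lemma pv_rotget : ∀ r ∈ pvRotorsA, ∀ k : Fin 26, ∀ i : Fin 26,
    (r.drop (k : Nat) ++ r.take (k : Nat)).getD (i : Nat) 'A' = r.getD (((i : Nat) + (k : Nat)) % 26) 'A' := by decide

-- `.index` in the k-rotated rotor is the modular shift of `.index` in the rotor.
set_option maxHeartbeats 4000000 in
lemma pv_rotidx : ∀ r ∈ pvRotorsA, ∀ k : Fin 26, ∀ j : Fin 26,
    (r.drop (k : Nat) ++ r.take (k : Nat)).idxOf (Char.ofNat ((j : Nat) + 65))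
      = (r.idxOf (Char.ofNat ((j : Nat) + 65)) + (26 - (k : Nat))) % 26 := by decide

-- Rotating the k-rotated rotor once more is the (k+1) % 26 rotation.
set_option maxHeartbeats 1000000 in
lemma pv_rot_step : ∀ r ∈ pvRotorsA, ∀ k : Fin 26,
    ((r.drop (k : Nat) ++ r.take (k : Nat)).drop 1 ++ (r.drop (k : Nat) ++ r.take (k : Nat)).take 1)
      = r.drop (((k : Nat) + 1) % 26) ++ r.take (((k : Nat) + 1) % 26) := by decide

-- Nat-interface wrappers around the Fin-quantified facts.
lemma pv_getD_bounds' (r : List Char) (hr : r ∈ pvRotorsA) (m : Nat) (hm : m < 26) :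
    65 ≤ (r.getD m 'A').toNat ∧ (r.getD m 'A').toNat ≤ 90 := pv_getD_bounds r hr ⟨m, hm⟩

lemma pv_refl_bounds' (m : Nat) (hm : m < 26) :
    65 ≤ (pvReflectorA.getD m 'A').toNat ∧ (pvReflectorA.getD m 'A').toNat ≤ 90 := pv_refl_bounds ⟨m, hm⟩

lemma pv_idx_lt' (r : List Char) (hr : r ∈ pvRotorsA) (j : Nat) (hj : j < 26) :
    r.idxOf (Char.ofNat (j + 65)) < 26 := pv_idx_lt r hr ⟨j, hj⟩

lemma pv_M' (r1 r2 r3 : List Char) (h1 : r1 ∈ pvRotorsA) (h2 : r2 ∈ pvRotorsA) (h3 : r3 ∈ pvRotorsA)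
    (i : Nat) (hi : i < 26) :
    pvIdx (pvM (pvFwd r1) (pvFwd r2) (pvFwd r3)) ((i : Nat) : Int)
      = ((r1.idxOf (Char.ofNat ((r2.idxOf (Char.ofNat ((r3.idxOf (Char.ofNat (((pvReflectorA.getD ((r3.getD ((r2.getD ((r1.getD i 'A').toNat - 65) 'A').toNat - 65) 'A').toNat - 65) 'A').toNat - 65) + 65))) + 65))) + 65)) : Nat) : Int) :=
  pv_M r1 h1 r2 h2 r3 h3 ⟨i, hi⟩

lemma pv_rotget' (r : List Char) (hr : r ∈ pvRotorsA) (k : Nat) (hk : k < 26) (i : Nat) (hi : i < 26) :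
    (r.drop k ++ r.take k).getD i 'A' = r.getD ((i + k) % 26) 'A' := pv_rotget r hr ⟨k, hk⟩ ⟨i, hi⟩

lemma pv_rotidx' (r : List Char) (hr : r ∈ pvRotorsA) (k : Nat) (hk : k < 26) (j : Nat) (hj : j < 26) :
    (r.drop k ++ r.take k).idxOf (Char.ofNat (j + 65))
      = (r.idxOf (Char.ofNat (j + 65)) + (26 - k)) % 26 := pv_rotidx r hr ⟨k, hk⟩ ⟨j, hj⟩

lemma pv_rot_step' (r : List Char) (hr : r ∈ pvRotorsA) (k : Nat) (hk : k < 26) :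
    ((r.drop k ++ r.take k).drop 1 ++ (r.drop k ++ r.take k).take 1)
      = r.drop ((k + 1) % 26) ++ r.take ((k + 1) % 26) := pv_rot_step r hr ⟨k, hk⟩

-- Python's % on the two integer expressions B uses, as Nat arithmetic.
lemma pv_mod_add (c k : Nat) (hc : 65 ≤ c) :
    PySem.Int.mod ((c : Int) - 65 + (k : Int)) 26 = (((c - 65 + k % 26) % 26 : Nat) : Int) := by
  rw [PySem.Int.mod_eq_emod_of_pos (by omega)]; omega

lemma pv_mod_sub (m k : Nat) (hm : m < 26) :
    PySem.Int.mod ((m : Int) - (k : Int)) 26 = (((m + (26 - k % 26)) % 26 : Nat) : Int) := by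
  rw [PySem.Int.mod_eq_emod_of_pos (by omega)]; omega

-- The glue: A's per-letter step on the (k % 26)-rotated rotor1 is B's modular lookup in M.
lemma pv_step_eq (r1 r2 r3 : List Char) (h1 : r1 ∈ pvRotorsA) (h2 : r2 ∈ pvRotorsA) (h3 : r3 ∈ pvRotorsA)
    (k : Nat) (c : Char) (hlo : 65 ≤ c.toNat) (hhi : c.toNat ≤ 90) :
    pvStepA (r1.drop (k % 26) ++ r1.take (k % 26)) r2 r3 c
      = pvEncChar (pvM (pvFwd r1) (pvFwd r2) (pvFwd r3)) c k := by
  have hk : k % 26 < 26 := Nat.mod_lt _ (by omega)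
  have hj : c.toNat - 65 < 26 := by omega
  have hm0 : (c.toNat - 65 + k % 26) % 26 < 26 := Nat.mod_lt _ (by omega)
  have hb1 := pv_getD_bounds' r1 h1 _ hm0
  have hn1 : (r1.getD ((c.toNat - 65 + k % 26) % 26) 'A').toNat - 65 < 26 := by omega
  have hb2 := pv_getD_bounds' r2 h2 _ hn1
  have hn2 : (r2.getD ((r1.getD ((c.toNat - 65 + k % 26) % 26) 'A').toNat - 65) 'A').toNat - 65 < 26 := by omega
  have hb3 := pv_getD_bounds' r3 h3 _ hn2
  have hn3 : (r3.getD ((r2.getD ((r1.getD ((c.toNat - 65 + k % 26) % 26) 'A').toNat - 65) 'A').toNat - 65) 'A').toNat - 65 < 26 := by omega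
  have hbr := pv_refl_bounds' _ hn3
  have hn4 : (pvReflectorA.getD ((r3.getD ((r2.getD ((r1.getD ((c.toNat - 65 + k % 26) % 26) 'A').toNat - 65) 'A').toNat - 65) 'A').toNat - 65) 'A').toNat - 65 < 26 := by omega
  have hm3 := pv_idx_lt' r3 h3 _ hn4
  have hm2 := pv_idx_lt' r2 h2 _ hm3
  have hm1 := pv_idx_lt' r1 h1 _ hm2
  simp only [pvStepA, pvEncChar]
  rw [pv_mod_add _ k hlo, pv_M' r1 r2 r3 h1 h2 h3 _ hm0,
      pv_rotget' r1 h1 _ hk _ hj, pv_rotidx' r1 h1 _ hk _ hm2,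
      pv_mod_sub _ k hm1]
  simp only [Int.toNat_natCast]

-- After .upper(), every char that isalpha is an uppercase ASCII letter.
lemma pv_isupper_iff (c : Char) : PySem.Chars.isupper c = true ↔ 65 ≤ c.toNat ∧ c.toNat ≤ 90 := by
  simp [PySem.Chars.isupper, Char.le_def, UInt32.le_iff_toNat_le, Char.toNat_val]

lemma pv_islower_iff (c : Char) : PySem.Chars.islower c = true ↔ 97 ≤ c.toNat ∧ c.toNat ≤ 122 := by
  simp [PySem.Chars.islower, Char.le_def, UInt32.le_iff_toNat_le, Char.toNat_val]

lemma pv_upper_alpha (c : Char) (h : PySem.Chars.isalpha (PySem.Chars.upperChar c) = true) :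
    65 ≤ (PySem.Chars.upperChar c).toNat ∧ (PySem.Chars.upperChar c).toNat ≤ 90 := by
  by_cases hl : PySem.Chars.islower c = true
  · have hb := (pv_islower_iff c).mp hl
    have hval : (c.toNat - 32).isValidChar := Or.inl (by omega)
    simp only [PySem.Chars.upperChar, hl, if_true]
    rw [Char.toNat_ofNat, if_pos hval]
    omega
  · simp only [PySem.Chars.upperChar, hl] at h ⊢
    have : PySem.Chars.isupper c = true := by
      simp only [PySem.Chars.isalpha, Bool.or_eq_true] at h
      tauto
    exact (pv_isupper_iff c).mp this

-- The loop invariant: A running on the (k % 26)-rotated rotor1 equals B's zip/map pass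
-- from counter value k, appended to the accumulator.
lemma pv_loop_eq (r1 r2 r3 : List Char) (h1 : r1 ∈ pvRotorsA) (h2 : r2 ∈ pvRotorsA) (h3 : r3 ∈ pvRotorsA) :
    ∀ (cs : List Char) (k : Nat) (out : List Char),
      (∀ c ∈ cs, PySem.Chars.isalpha c = true → 65 ≤ c.toNat ∧ c.toNat ≤ 90) →
      pvLoopA r2 r3 cs (r1.drop (k % 26) ++ r1.take (k % 26)) out
        = out ++ (cs.zip (pvOffs cs k)).map (fun p =>
            if PySem.Chars.isalpha p.1 then pvEncChar (pvM (pvFwd r1) (pvFwd r2) (pvFwd r3)) p.1 p.2 else p.1) := by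
  intro cs
  induction cs with
  | nil => intro k out _; simp [pvLoopA, pvOffs]
  | cons c cs ih =>
    intro k out hcs
    have hc := hcs c (List.mem_cons_self)
    have hcs' : ∀ c' ∈ cs, PySem.Chars.isalpha c' = true → 65 ≤ c'.toNat ∧ c'.toNat ≤ 90 :=
      fun c' hm => hcs c' (List.mem_cons_of_mem _ hm)
    have hk : k % 26 < 26 := Nat.mod_lt _ (by omega)
    by_cases ha : PySem.Chars.isalpha c = true
    · obtain ⟨hlo, hhi⟩ := hc ha
      simp only [pvLoopA, pvOffs, ha, List.zip_cons_cons, List.map_cons, Bool.not_true,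
        Bool.false_eq_true, if_false, if_true]
      have hmod : (k % 26 + 1) % 26 = (k + 1) % 26 := by omega
      rw [pv_rot_step' r1 h1 _ hk, hmod, pv_step_eq r1 r2 r3 h1 h2 h3 k c hlo hhi,
        ih (k + 1) _ hcs']
      simp
    · have hf : PySem.Chars.isalpha c = false := by simpa using ha
      simp only [pvLoopA, pvOffs, hf, List.zip_cons_cons, List.map_cons, Bool.not_false,
        Bool.false_eq_true, if_false, if_true]
      rw [ih k _ hcs']
      simp

-- ===== VERDICT (by name: the statement is the Claim_ definition above) =====
theorem enigma_cipher_spec : Claim_equal_enigma_cipher := by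
  intro text rp _ hpre
  obtain ⟨hlen, hbound⟩ := hpre
  match rp, hlen with
  | [i1, i2, i3], _ =>
    unfold Spec_enigma_cipher enigma_cipher enigma_cipher_alt
    obtain ⟨r1, s1, hA1, hB1, hs1, hm1⟩ := pv_get_pair i1 (hbound i1 (by simp)).1 (hbound i1 (by simp)).2
    obtain ⟨r2, s2, hA2, hB2, hs2, hm2⟩ := pv_get_pair i2 (hbound i2 (by simp)).1 (hbound i2 (by simp)).2
    obtain ⟨r3, s3, hA3, hB3, hs3, hm3⟩ := pv_get_pair i3 (hbound i3 (by simp)).1 (hbound i3 (by simp)).2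
    have hupper : ∀ c ∈ PySem.Chars.upper text.toList,
        PySem.Chars.isalpha c = true → 65 ≤ c.toNat ∧ c.toNat ≤ 90 := by
      intro c hm ha
      simp only [PySem.Chars.upper, List.mem_map] at hm
      obtain ⟨c0, _, rfl⟩ := hm
      exact pv_upper_alpha c0 ha
    simp only [hA1, hA2, hA3,
      show ([i1, i2, i3] : List Int)[0]? = some i1 from rfl,
      show ([i1, i2, i3] : List Int)[1]? = some i2 from rfl,
      show ([i1, i2, i3] : List Int)[2]? = some i3 from rfl,
      hB1, hB2, hB3, Option.bind_some, Option.map_some, Option.getD_some, hs1, hs2, hs3]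
    have := pv_loop_eq r1 r2 r3 hm1 hm2 hm3 (PySem.Chars.upper text.toList) 0 [] hupper
    simp only [Nat.zero_mod, List.drop_zero, List.take_zero, List.append_nil, List.nil_append] at this
    rw [this]
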